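-- pv_equiv track=rewrite | github.com/lkuehner/infraScan | infraScanRail/capacity_calculator.py | _classify_all_service_patterns
-- ===== SOURCE A (Python) =====
-- from typing import Dict, List, Optional, Set, Tuple
--
-- def _classify_service_pattern(
--     service: str,
--     path_nodes: List[int],
--     node_stop_services: Dict[int, set[str]]
-- ) -> str:
--     """
--     Classify a service's stopping pattern for a given path.
--
--     Args:
--         service: Service identifier (e.g., "S14", "IC1")
--         path_nodes: List of node IDs representing the path
--         node_stop_services: Dict mapping node ID to set of services that stop there
--
--     Returns:
--         Pattern type: "ALL-STOP" | "ENDS-ONLY" | "PARTIAL" | "ABSENT"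
--
--     Pattern Definitions:
--         - ALL-STOP: Service stops at all nodes in the path
--         - ENDS-ONLY: Service stops only at first and last nodes (requires 3+ nodes)
--         - PARTIAL: Service stops at some nodes (not all, not just ends)
--         - ABSENT: Service does not stop at any node in the path
--     """
--     if len(path_nodes) < 2:
--         return "ABSENT"
--
--     # Identify which nodes the service stops at
--     stops_at = [node for node in path_nodes if service in node_stop_services.get(node, set())]
--
--     stops_count = len(stops_at)
--     total_nodes = len(path_nodes)
--
--     # Classify pattern
--     if stops_count == 0:
--         return "ABSENT"
--     elif stops_count == total_nodes:
--         return "ALL-STOP"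
--     elif stops_count == 2 and total_nodes >= 3:
--         # Check if stops only at first and last
--         if stops_at == [path_nodes[0], path_nodes[-1]]:
--             return "ENDS-ONLY"
--         else:
--             return "PARTIAL"
--     else:
--         # Stops at some but not all nodes
--         return "PARTIAL"
--
-- def _classify_all_service_patterns(
--     path_nodes: List[int],
--     all_services: set[str],
--     node_stop_services: Dict[int, set[str]]
-- ) -> Dict[str, str]:
--     """
--     Classify patterns for all services operating on a path.
--
--     Args:
--         path_nodes: List of node IDs representing the path
--         all_services: Set of all service identifiers to classify
--         node_stop_services: Dict mapping node ID to set of services that stop there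
--
--     Returns:
--         Dictionary mapping service name to pattern type
--         Example: {"S14": "ALL-STOP", "G": "ENDS-ONLY", "S15": "ENDS-ONLY"}
--     """
--     patterns = {}
--     for service in all_services:
--         patterns[service] = _classify_service_pattern(service, path_nodes, node_stop_services)
--     return patterns
-- ===== SOURCE B (Python) =====
-- from typing import Dict, List
--
-- def _classify_all_service_patterns(
--     path_nodes: List[int],
--     all_services: set[str],
--     node_stop_services: Dict[int, set[str]]
-- ) -> Dict[str, str]:
--     # One pass over the path: per service keep (stop count, first stop, second stop),
--     # then classify every service straight from its accumulator.
--     if len(path_nodes) < 2: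
--         return {service: "ABSENT" for service in all_services}
--
--     acc = {}  # service -> [count, first stop node, second stop node]
--     for node in path_nodes:
--         for service in set(node_stop_services.get(node, ())):
--             rec = acc.get(service)
--             if rec is None:
--                 acc[service] = [1, node, node]
--             else:
--                 rec[0] += 1
--                 if rec[0] == 2:
--                     rec[2] = node
--
--     total = len(path_nodes)
--     first, last = path_nodes[0], path_nodes[-1]
--     result = {}
--     for service in all_services:
--         rec = acc.get(service)
--         if rec is None:
--             result[service] = "ABSENT"
--         elif rec[0] == total:
--             result[service] = "ALL-STOP"
--         elif rec[0] == 2 and total >= 3 and rec[1] == first and rec[2] == last: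
--             result[service] = "ENDS-ONLY"
--         else:
--             result[service] = "PARTIAL"
--     return result
-- ===== Notes on version B (the rewrite author's own statement) =====
-- stated objective: faster
-- what changed: A classifies each service by scanning the whole path per service (O(S*P)); B makes one pass over the path bucketing (count, first stop, second stop) per service in a dict, then classifies every service from its accumulator in O(P + K + S).
import Mathlib
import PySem

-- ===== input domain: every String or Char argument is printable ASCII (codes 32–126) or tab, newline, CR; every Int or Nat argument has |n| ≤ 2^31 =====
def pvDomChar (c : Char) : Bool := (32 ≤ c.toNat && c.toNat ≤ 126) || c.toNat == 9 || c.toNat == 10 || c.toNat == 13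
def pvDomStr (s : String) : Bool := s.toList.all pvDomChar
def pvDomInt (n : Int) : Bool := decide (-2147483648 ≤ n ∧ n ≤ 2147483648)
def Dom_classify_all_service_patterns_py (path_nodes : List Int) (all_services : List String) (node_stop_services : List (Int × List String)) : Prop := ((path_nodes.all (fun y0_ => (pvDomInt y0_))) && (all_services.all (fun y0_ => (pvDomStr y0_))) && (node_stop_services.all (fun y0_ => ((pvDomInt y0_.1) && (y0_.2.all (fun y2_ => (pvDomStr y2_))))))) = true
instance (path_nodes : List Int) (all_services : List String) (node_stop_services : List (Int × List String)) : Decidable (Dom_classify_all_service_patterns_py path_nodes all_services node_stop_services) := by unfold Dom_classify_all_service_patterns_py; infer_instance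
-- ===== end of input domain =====

-- B replaces A's per-service scan of the whole path (O(S·P)) by ONE pass over the path that
-- buckets (count, first stop, second stop) per service, then classifies each service from its
-- accumulator (O(P·deg + S)).

-- ===== PORT A =====
-- node_stop_services.get(node, set()) — first-match association-list lookup with default
def pvNssGetA (node_stop_services : List (Int × List String)) (node : Int) : List String :=
  (PySem.Dict.mk node_stop_services).getD node []

-- literal port of _classify_service_pattern
def pvClassifyServicePattern (service : String) (path_nodes : List Int) (node_stop_services : List (Int × List String)) : String :=
  if path_nodes.length < 2 then "ABSENT"
  else
    let stops_at := path_nodes.filter (fun node => (pvNssGetA node_stop_services node).contains service)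
    let stops_count := stops_at.length
    let total_nodes := path_nodes.length
    if stops_count = 0 then "ABSENT"
    else if stops_count = total_nodes then "ALL-STOP"
    else if stops_count = 2 ∧ 3 ≤ total_nodes then
      -- path_nodes[0] / path_nodes[-1]: in range here since 2 ≤ length, so the defaults are dead
      if stops_at = [PySem.List.pyGetD path_nodes 0 0, PySem.List.pyGetD path_nodes (-1) 0] then "ENDS-ONLY"
      else "PARTIAL"
    else "PARTIAL"

def classify_all_service_patterns_py (path_nodes : List Int) (all_services : List String) (node_stop_services : List (Int × List String)) : List (String × String) :=
  (all_services.foldl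
    (fun patterns service => patterns.insert service (pvClassifyServicePattern service path_nodes node_stop_services))
    PySem.Dict.empty).items

-- ===== PORT B =====
-- advance one service's (count, first stop, second stop) record by a stop at `node`
def pvTouch (node : Int) (rec? : Option (Int × Int × Int)) : Int × Int × Int :=
  match rec? with
  | none => (1, node, node)
  | some (c, f, sec) => (c + 1, f, if c + 1 = 2 then node else sec)

-- the inner loop: record a stop at `node` for every service of its (distinct-element) stop set
def pvStepNode (node : Int) (acc : PySem.Dict String (Int × Int × Int)) (svcs : List String) : PySem.Dict String (Int × Int × Int) :=
  svcs.foldl (fun acc service => acc.insert service (pvTouch node (acc.get? service))) acc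

-- classify one service from its accumulator record
def pvClassFromAcc (total first last : Int) (rec? : Option (Int × Int × Int)) : String :=
  match rec? with
  | none => "ABSENT"
  | some (c, f, sec) =>
    if c = total then "ALL-STOP"
    else if c = 2 ∧ 3 ≤ total ∧ f = first ∧ sec = last then "ENDS-ONLY"
    else "PARTIAL"

def classify_all_service_patterns_py_alt (path_nodes : List Int) (all_services : List String) (node_stop_services : List (Int × List String)) : List (String × String) :=
  if path_nodes.length < 2 then
    (all_services.foldl (fun r s => r.insert s "ABSENT") PySem.Dict.empty).items
  else
    let acc := path_nodes.foldl
      (fun a node => pvStepNode node a (PySem.Set.ofList ((PySem.Dict.mk node_stop_services).getD node [])))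
      PySem.Dict.empty
    let total : Int := path_nodes.length
    let first := PySem.List.pyGetD path_nodes 0 0
    let last := PySem.List.pyGetD path_nodes (-1) 0
    (all_services.foldl (fun r s => r.insert s (pvClassFromAcc total first last (acc.get? s))) PySem.Dict.empty).items

-- ===== PRECONDITION & SPEC =====
def Spec_classify_all_service_patterns_py (path_nodes : List Int) (all_services : List String) (node_stop_services : List (Int × List String)) (out : List (String × String)) : Prop := out = classify_all_service_patterns_py_alt path_nodes all_services node_stop_services
instance (path_nodes : List Int) (all_services : List String) (node_stop_services : List (Int × List String)) (out : List (String × String)) : Decidable (Spec_classify_all_service_patterns_py path_nodes all_services node_stop_services out) := by unfold Spec_classify_all_service_patterns_py; infer_instance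

-- ===== CLAIM (what is proved, stated in full; the proofs are below) =====
def Claim_equal_classify_all_service_patterns_py : Prop := ∀ (path_nodes : List Int) (all_services : List String) (node_stop_services : List (Int × List String)), Dom_classify_all_service_patterns_py path_nodes all_services node_stop_services → Spec_classify_all_service_patterns_py path_nodes all_services node_stop_services (classify_all_service_patterns_py path_nodes all_services node_stop_services)

-- ===== LEMMAS AND PROOFS =====

-- the list of path nodes at which `s` stops (A's stops_at)
def pvStops (s : String) (node_stop_services : List (Int × List String)) (pn : List Int) : List Int :=
  pn.filter (fun node => (pvNssGetA node_stop_services node).contains s)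

-- what B's accumulator should hold for a service whose stop list is `l`
def pvEncode (l : List Int) : Option (Int × Int × Int) :=
  match l with
  | [] => none
  | a :: rest => some ((rest.length : Int) + 1, a, rest.headD a)

lemma pvEncode_append (l : List Int) (node : Int) :
    pvEncode (l ++ [node]) = some (pvTouch node (pvEncode l)) := by
  cases l with
  | nil => simp [pvEncode, pvTouch]
  | cons a rest =>
    cases rest with
    | nil => simp [pvEncode, pvTouch]
    | cons b r => simp [pvEncode, pvTouch]; omega

-- a fold of single-key inserts over keys not containing s leaves get? s unchanged
lemma pvStepNode_get?_not_mem (node : Int) (acc : PySem.Dict String (Int × Int × Int))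
    (svcs : List String) (s : String) (hs : s ∉ svcs) :
    (pvStepNode node acc svcs).get? s = acc.get? s := by
  induction svcs generalizing acc with
  | nil => rfl
  | cons x rest ih =>
    simp only [pvStepNode, List.foldl_cons] at *
    rw [ih _ (by simp at hs; exact hs.2)]
    exact PySem.Dict.get?_insert_of_ne _ _ (by simp at hs; exact hs.1)

lemma pvStepNode_get? (node : Int) (acc : PySem.Dict String (Int × Int × Int))
    (svcs : List String) (hnd : svcs.Nodup) (s : String) :
    (pvStepNode node acc svcs).get? s =
      if s ∈ svcs then some (pvTouch node (acc.get? s)) else acc.get? s := by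
  induction svcs generalizing acc with
  | nil => simp [pvStepNode]
  | cons x rest ih =>
    simp only [pvStepNode, List.foldl_cons]
    rcases List.nodup_cons.mp hnd with ⟨hx, hrest⟩
    by_cases hsx : s = x
    · subst hsx
      rw [show (rest.foldl (fun acc service => acc.insert service (pvTouch node (acc.get? service)))
            (acc.insert s (pvTouch node (acc.get? s)))) = pvStepNode node (acc.insert s (pvTouch node (acc.get? s))) rest from rfl]
      rw [pvStepNode_get?_not_mem _ _ _ _ hx]
      simp [PySem.Dict.get?_insert_self]
    · rw [show (rest.foldl (fun acc service => acc.insert service (pvTouch node (acc.get? service)))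
            (acc.insert x (pvTouch node (acc.get? x)))) = pvStepNode node (acc.insert x (pvTouch node (acc.get? x))) rest from rfl]
      rw [ih _ hrest]
      rw [PySem.Dict.get?_insert_of_ne _ _ hsx]
      simp [hsx]

-- main accumulator invariant, by induction on the path with a generalized prefix
lemma pvAcc_inv (pn : List Int) (node_stop_services : List (Int × List String))
    (g : String → List Int) (acc : PySem.Dict String (Int × Int × Int))
    (h : ∀ s, acc.get? s = pvEncode (g s)) :
    ∀ s, (pn.foldl
        (fun a node => pvStepNode node a (PySem.Set.ofList ((PySem.Dict.mk node_stop_services).getD node [])))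
        acc).get? s = pvEncode (g s ++ pvStops s node_stop_services pn) := by
  induction pn generalizing g acc with
  | nil => intro s; simpa [pvStops] using h s
  | cons node rest ih =>
    intro s
    simp only [List.foldl_cons]
    have step : ∀ t, (pvStepNode node acc (PySem.Set.ofList ((PySem.Dict.mk node_stop_services).getD node []))).get? t
        = pvEncode (g t ++ (if (pvNssGetA node_stop_services node).contains t then [node] else [])) := by
      intro t
      rw [pvStepNode_get? _ _ _ (PySem.Set.nodup_ofList _) t]
      by_cases hm : t ∈ ((PySem.Dict.mk node_stop_services).getD node [])
      · have : t ∈ PySem.Set.ofList ((PySem.Dict.mk node_stop_services).getD node []) :=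
          (PySem.Set.mem_ofList _ _).mpr hm
        simp only [this, if_pos, h t]
        have hc : (pvNssGetA node_stop_services node).contains t = true := by
          simpa [pvNssGetA] using hm
        rw [hc]
        simp [pvEncode_append]
      · have : t ∉ PySem.Set.ofList ((PySem.Dict.mk node_stop_services).getD node []) := by
          intro hmem; exact hm ((PySem.Set.mem_ofList _ _).mp hmem)
        simp only [this, if_neg, not_false_iff, h t]
        have hc : (pvNssGetA node_stop_services node).contains t = false := by
          simp [pvNssGetA]; simpa using hm
        rw [hc]
        simp
    have := ih (fun t => g t ++ (if (pvNssGetA node_stop_services node).contains t then [node] else []))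
      _ step s
    rw [this]
    unfold pvStops
    rw [List.filter_cons]
    rcases Bool.eq_false_or_eq_true ((pvNssGetA node_stop_services node).contains s) with hc | hc
    · have hm : s ∈ pvNssGetA node_stop_services node := by simpa using hc
      simp [hm]
    · have hm : s ∉ pvNssGetA node_stop_services node := by simpa using hc
      simp [hm]

-- per-service: A's classification equals B's classification from the encoded stop list
lemma pvClass_eq (s : String) (pn : List Int) (nss : List (Int × List String)) (h2 : 2 ≤ pn.length) :
    pvClassifyServicePattern s pn nss =
      pvClassFromAcc (pn.length : Int) (PySem.List.pyGetD pn 0 0) (PySem.List.pyGetD pn (-1) 0)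
        (pvEncode (pvStops s nss pn)) := by
  have hnlt : ¬ pn.length < 2 := by omega
  unfold pvClassifyServicePattern pvStops
  rw [if_neg hnlt]
  cases hst : pn.filter (fun node => (pvNssGetA nss node).contains s) with
  | nil =>
    simp [pvEncode, pvClassFromAcc]
  | cons a rest =>
    simp only [pvEncode, pvClassFromAcc, List.length_cons]
    rw [if_neg (by omega : ¬ (rest.length + 1 = 0))]
    by_cases hall : rest.length + 1 = pn.length
    · rw [if_pos hall, if_pos (by exact_mod_cast hall)]
    · rw [if_neg hall,
        if_neg (show ¬((rest.length : Int) + 1 = (pn.length : Int)) from fun hc => hall (by exact_mod_cast hc))]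
      by_cases h2c : rest.length + 1 = 2 ∧ 3 ≤ pn.length
      · obtain ⟨hr1, h3⟩ := h2c
        obtain ⟨b, rfl⟩ : ∃ b, rest = [b] := by
          cases rest with
          | nil => exact absurd hr1 (by simp)
          | cons b r =>
            cases r with
            | nil => exact ⟨b, rfl⟩
            | cons c r2 => exfalso; simp [List.length_cons] at hr1
        rw [if_pos ⟨by simp, h3⟩]
        by_cases heq : a = PySem.List.pyGetD pn 0 0 ∧ b = PySem.List.pyGetD pn (-1) 0
        · rw [if_pos (by rw [heq.1, heq.2]),
            if_pos ⟨by simp, by exact_mod_cast h3, heq.1, by simpa using heq.2⟩]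
        · rw [if_neg (by intro hc; simp at hc; exact heq hc),
            if_neg (by intro hc; exact heq ⟨hc.2.2.1, by simpa using hc.2.2.2⟩)]
      · rw [if_neg h2c,
          if_neg (by intro hc; exact h2c ⟨by exact_mod_cast hc.1, by exact_mod_cast hc.2.1⟩)]

-- two insert-folds over the same keys with pointwise-equal values build the same dict
lemma pvFoldl_insert_congr {ν : Type} (l : List String) (f g : String → ν)
    (h : ∀ s ∈ l, f s = g s) (d : PySem.Dict String ν) :
    l.foldl (fun r s => r.insert s (f s)) d = l.foldl (fun r s => r.insert s (g s)) d := by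
  induction l generalizing d with
  | nil => rfl
  | cons x rest ih =>
    simp only [List.foldl_cons]
    rw [h x (by simp)]
    exact ih (fun s hs => h s (List.mem_cons_of_mem _ hs)) _

-- ===== VERDICT (by name: the statement is the Claim_ definition above) =====
theorem classify_all_service_patterns_py_spec : Claim_equal_classify_all_service_patterns_py := by
  intro pn svcs nss _
  unfold Spec_classify_all_service_patterns_py
  unfold classify_all_service_patterns_py classify_all_service_patterns_py_alt
  by_cases hlen : pn.length < 2
  · rw [if_pos hlen]
    congr 1
    exact pvFoldl_insert_congr svcs _ _
      (fun s _ => by unfold pvClassifyServicePattern; rw [if_pos hlen]) _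
  · rw [if_neg hlen]
    have hacc := pvAcc_inv pn nss (fun _ => []) PySem.Dict.empty
      (fun s => by simp [PySem.Dict.get?_empty, pvEncode])
    congr 1
    exact pvFoldl_insert_congr svcs _ _
      (fun s _ => by
        rw [pvClass_eq s pn nss (by omega)]
        rw [show (pn.foldl (fun a node => pvStepNode node a (PySem.Set.ofList ((PySem.Dict.mk nss).getD node []))) PySem.Dict.empty).get? s = pvEncode ([] ++ pvStops s nss pn) from hacc s]
        simp) _
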